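-- pv_equiv track=rewrite | github.com/Volkopat/CSE-573-Introduction-To-Computer-Vision-and-Image-Processing | Project 1 - Optical Character Recognition/task1.py | CharacterExtraction
-- ===== SOURCE A (Python) =====
-- from collections import defaultdict
--
-- def CharacterExtraction(components):
--
--     rowDict = defaultdict(list)
--     colDict = defaultdict(list)
--     for i in range(len(components)):
--         for j in range(len(components[i])):
--             if(components[i][j] == 0): continue
--             else:
--                 rowDict[components[i][j]].append(i)
--                 colDict[components[i][j]].append(j)
--
--     minrow = defaultdict(list)
--     mincol = defaultdict(list)
--     maxrow = defaultdict(list)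
--     maxcol = defaultdict(list)
--
--     for i in rowDict:
--         minrow[i] = min(rowDict[i])
--         maxrow[i] = max(rowDict[i])
--     for i in colDict:
--         mincol[i] = min(colDict[i])
--         maxcol[i] = max(colDict[i])
--
--     return minrow, maxrow, mincol, maxcol
-- ===== SOURCE B (Python) =====
-- from collections import defaultdict
--
-- def CharacterExtraction(components):
--     # Single fused pass: maintain the four per-label extrema directly.
--     minrow = defaultdict(list)
--     maxrow = defaultdict(list)
--     mincol = defaultdict(list)
--     maxcol = defaultdict(list)
--     for i, row in enumerate(components):
--         for j, v in enumerate(row):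
--             if v == 0:
--                 continue
--             if v in minrow:
--                 minrow[v] = min(minrow[v], i)
--                 maxrow[v] = max(maxrow[v], i)
--                 mincol[v] = min(mincol[v], j)
--                 maxcol[v] = max(maxcol[v], j)
--             else:
--                 minrow[v] = i
--                 maxrow[v] = i
--                 mincol[v] = j
--                 maxcol[v] = j
--     return minrow, maxrow, mincol, maxcol
-- ===== Notes on version B (the rewrite author's own statement) =====
-- stated objective: simpler
-- what changed: Single fused pass that maintains the four scalar extrema per label directly, dropping the intermediate rowDict/colDict coordinate lists and the second min/max reduction pass.
import Mathlib
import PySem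

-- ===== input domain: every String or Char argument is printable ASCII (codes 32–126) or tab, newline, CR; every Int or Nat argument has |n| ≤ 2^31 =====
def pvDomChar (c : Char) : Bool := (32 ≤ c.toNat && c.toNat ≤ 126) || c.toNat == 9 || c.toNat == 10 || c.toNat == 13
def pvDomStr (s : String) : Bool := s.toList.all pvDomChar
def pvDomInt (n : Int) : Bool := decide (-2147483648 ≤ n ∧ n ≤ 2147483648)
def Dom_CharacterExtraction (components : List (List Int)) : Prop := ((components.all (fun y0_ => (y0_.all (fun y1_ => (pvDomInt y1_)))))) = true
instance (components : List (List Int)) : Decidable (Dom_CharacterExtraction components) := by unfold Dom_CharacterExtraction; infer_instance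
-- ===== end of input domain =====

-- B fuses A's two passes into one: it maintains the four per-label extrema directly
-- instead of building per-label coordinate lists and reducing them afterwards (same
-- return value; objective: simpler).

-- ===== PORT A =====
-- Literal port of A.  Pass 1 appends each nonzero pixel's row/column index to the
-- per-label lists rowDict/colDict; pass 2 walks a dict's keys and records min/max of
-- each list (Python builds minrow & maxrow in one loop over rowDict and mincol &
-- maxcol in one loop over colDict: `pvAReduce`).  The `.getD 0` after min?/max? is
-- unreachable (every stored list is nonempty; Python's min/max raises only on []).
def pvAPass1 (components : List (List Int)) :
    PySem.Dict Int (List Int) × PySem.Dict Int (List Int) :=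
  (PySem.List.enumerate components).foldl
    (fun (rc : PySem.Dict Int (List Int) × PySem.Dict Int (List Int)) iv =>
      (PySem.List.enumerate iv.2).foldl
        (fun rc jv =>
          if jv.2 == 0 then rc
          else (rc.1.modify jv.2 [] (fun l => l ++ [iv.1]),
                rc.2.modify jv.2 [] (fun l => l ++ [jv.1])))
        rc)
    (PySem.Dict.empty, PySem.Dict.empty)

def pvAReduce (d : PySem.Dict Int (List Int)) : PySem.Dict Int Int × PySem.Dict Int Int :=
  d.keys.foldl
    (fun (mm : PySem.Dict Int Int × PySem.Dict Int Int) k =>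
      (mm.1.insert k ((PySem.List.min? (d.getD k []) (fun x => x)).getD 0),
       mm.2.insert k ((PySem.List.max? (d.getD k []) (fun x => x)).getD 0)))
    (PySem.Dict.empty, PySem.Dict.empty)

def CharacterExtraction (components : List (List Int)) :
    (List (Int × Int)) × (List (Int × Int)) × (List (Int × Int)) × (List (Int × Int)) :=
  ((pvAReduce (pvAPass1 components).1).1.items,
   (pvAReduce (pvAPass1 components).1).2.items,
   (pvAReduce (pvAPass1 components).2).1.items,
   (pvAReduce (pvAPass1 components).2).2.items)

-- ===== PORT B =====
-- Literal port of B (Source B): one fused pass maintaining the four extrema dicts.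
def pvBPass (components : List (List Int)) :
    PySem.Dict Int Int × PySem.Dict Int Int × PySem.Dict Int Int × PySem.Dict Int Int :=
  (PySem.List.enumerate components).foldl
    (fun (st : PySem.Dict Int Int × PySem.Dict Int Int × PySem.Dict Int Int × PySem.Dict Int Int) iv =>
      (PySem.List.enumerate iv.2).foldl
        (fun st jv =>
          if jv.2 == 0 then st
          else if st.1.contains jv.2 then
            (st.1.insert jv.2 (min (st.1.getD jv.2 0) iv.1),
             st.2.1.insert jv.2 (max (st.2.1.getD jv.2 0) iv.1),
             st.2.2.1.insert jv.2 (min (st.2.2.1.getD jv.2 0) jv.1),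
             st.2.2.2.insert jv.2 (max (st.2.2.2.getD jv.2 0) jv.1))
          else
            (st.1.insert jv.2 iv.1, st.2.1.insert jv.2 iv.1,
             st.2.2.1.insert jv.2 jv.1, st.2.2.2.insert jv.2 jv.1))
        st)
    (PySem.Dict.empty, PySem.Dict.empty, PySem.Dict.empty, PySem.Dict.empty)

def CharacterExtraction_alt (components : List (List Int)) :
    (List (Int × Int)) × (List (Int × Int)) × (List (Int × Int)) × (List (Int × Int)) :=
  ((pvBPass components).1.items, (pvBPass components).2.1.items,
   (pvBPass components).2.2.1.items, (pvBPass components).2.2.2.items)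

-- ===== PRECONDITION & SPEC =====
def Spec_CharacterExtraction (components : List (List Int)) (out : (List (Int × Int)) × (List (Int × Int)) × (List (Int × Int)) × (List (Int × Int))) : Prop := out = CharacterExtraction_alt components
instance (components : List (List Int)) (out : (List (Int × Int)) × (List (Int × Int)) × (List (Int × Int)) × (List (Int × Int))) : Decidable (Spec_CharacterExtraction components out) := by unfold Spec_CharacterExtraction; infer_instance

-- ===== CLAIM (what is proved, stated in full; the proofs are below) =====
def Claim_equal_CharacterExtraction : Prop := ∀ (components : List (List Int)), Dom_CharacterExtraction components → Spec_CharacterExtraction components (CharacterExtraction components)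

-- ===== LEMMAS AND PROOFS =====

-- The nonzero pixels of the grid, row-major, as (label, row, col).
def pvPix1 (i : Int) (jv : Int × Int) : Option (Int × Int × Int) :=
  if jv.2 == 0 then none else some (jv.2, i, jv.1)

def pvPixels (components : List (List Int)) : List (Int × Int × Int) :=
  (PySem.List.enumerate components).flatMap
    (fun iv => (PySem.List.enumerate iv.2).filterMap (pvPix1 iv.1))

-- Labels in order of first appearance.
def pvK (P : List (Int × Int × Int)) : List Int := PySem.Set.ofList (P.map (·.1))

-- The reduced value (min or max, chosen by `red`) of coordinate `ext` over label k.
def pvVal (red : List Int → Option Int) (ext : Int × Int × Int → Int)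
    (P : List (Int × Int × Int)) (k : Int) : Int :=
  (red ((P.filter (fun p => p.1 == k)).map ext)).getD 0

def pvDict (red : List Int → Option Int) (ext : Int × Int × Int → Int)
    (P : List (Int × Int × Int)) : PySem.Dict Int Int :=
  PySem.Dict.mk ((pvK P).map (fun k => (k, pvVal red ext P k)))

def pvRedMin (l : List Int) : Option Int := PySem.List.min? l (fun x => x)
def pvRedMax (l : List Int) : Option Int := PySem.List.max? l (fun x => x)

-- Both ports' nested loops are folds over the pixel stream.
lemma pvInner {σ : Type} (g : σ → Int × Int × Int → σ) (i : Int) (M : List (Int × Int)) (s : σ) :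
    M.foldl (fun s jv => if jv.2 == 0 then s else g s (jv.2, i, jv.1)) s
      = (M.filterMap (pvPix1 i)).foldl g s := by
  induction M generalizing s with
  | nil => rfl
  | cons jv M ih =>
    rw [List.foldl_cons, List.filterMap_cons]
    by_cases h : jv.2 = 0
    · rw [if_pos (by simpa using h)]
      rw [show pvPix1 i jv = none by simp [pvPix1, h]]
      exact ih s
    · rw [if_neg (by simpa using h)]
      rw [show pvPix1 i jv = some (jv.2, i, jv.1) by simp [pvPix1, h]]
      rw [List.foldl_cons]
      exact ih _

lemma pvNested {σ : Type} (g : σ → Int × Int × Int → σ) (components : List (List Int)) (s : σ) :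
    (PySem.List.enumerate components).foldl
      (fun s iv => (PySem.List.enumerate iv.2).foldl
        (fun s jv => if jv.2 == 0 then s else g s (jv.2, iv.1, jv.1)) s) s
      = (pvPixels components).foldl g s := by
  unfold pvPixels
  generalize PySem.List.enumerate components = L
  induction L generalizing s with
  | nil => rfl
  | cons iv L ih =>
    simp only [List.foldl_cons, List.flatMap_cons, List.foldl_append]
    rw [pvInner]
    exact ih _

lemma pvFoldPair {α β γ : Type} (f : α → γ → α) (g : β → γ → β) (l : List γ) (a : α) (b : β) :
    l.foldl (fun s x => (f s.1 x, g s.2 x)) (a, b) = (l.foldl f a, l.foldl g b) := by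
  induction l generalizing a b with
  | nil => rfl
  | cons x l ih => simp [List.foldl_cons, ih]

-- min?/max? over an id key: value of a one-element list and of an appended element.
lemma pvRedMin_single (x : Int) : pvRedMin [x] = some x := by
  simp [pvRedMin, PySem.List.min?_id_cons]

lemma pvRedMax_single (x : Int) : pvRedMax [x] = some x := by
  simp [pvRedMax, PySem.List.max?_id_cons]

lemma pvRedMin_append (l : List Int) (x : Int) (h : l ≠ []) :
    (pvRedMin (l ++ [x])).getD 0 = min ((pvRedMin l).getD 0) x := by
  obtain ⟨y, t, rfl⟩ := List.exists_cons_of_ne_nil h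
  simp [pvRedMin, List.cons_append, PySem.List.min?_id_cons, List.foldl_append]

lemma pvRedMax_append (l : List Int) (x : Int) (h : l ≠ []) :
    (pvRedMax (l ++ [x])).getD 0 = max ((pvRedMax l).getD 0) x := by
  obtain ⟨y, t, rfl⟩ := List.exists_cons_of_ne_nil h
  simp [pvRedMax, List.cons_append, PySem.List.max?_id_cons, List.foldl_append]

lemma pvK_append (P : List (Int × Int × Int)) (p : Int × Int × Int) :
    pvK (P ++ [p]) = PySem.Set.add (pvK P) p.1 := by
  simp [pvK, List.map_append, PySem.Set.ofList_eq_foldl, List.foldl_append]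

lemma pvK_nodup (P : List (Int × Int × Int)) : (pvK P).Nodup := PySem.Set.nodup_ofList _

lemma pvVal_append_ne (red : List Int → Option Int) (ext : Int × Int × Int → Int)
    (P : List (Int × Int × Int)) (p : Int × Int × Int) (k : Int) (hk : k ≠ p.1) :
    pvVal red ext (P ++ [p]) k = pvVal red ext P k := by
  have : (p.1 == k) = false := by simp [hk.symm]
  simp [pvVal, List.filter_append, this]

lemma pvVal_mem_ne_nil (ext : Int × Int × Int → Int) (P : List (Int × Int × Int)) (k : Int)
    (h : k ∈ P.map (·.1)) : (P.filter (fun p => p.1 == k)).map ext ≠ [] := by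
  obtain ⟨q, hq, hq1⟩ := List.mem_map.mp h
  have : q ∈ P.filter (fun p => p.1 == k) := List.mem_filter.mpr ⟨hq, by simp [hq1]⟩
  intro hnil
  simp only [List.map_eq_nil_iff] at hnil
  rw [hnil] at this
  exact List.not_mem_nil this

lemma pvFilterSingle (ext : Int × Int × Int → Int) (p : Int × Int × Int) :
    (List.filter (fun q => q.1 == p.1) [p]).map ext = [ext p] := by simp

lemma pvVal_append_self_min (P : List (Int × Int × Int)) (p : Int × Int × Int)
    (ext : Int × Int × Int → Int) (h : p.1 ∈ P.map (·.1)) :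
    pvVal pvRedMin ext (P ++ [p]) p.1 = min (pvVal pvRedMin ext P p.1) (ext p) := by
  unfold pvVal
  rw [List.filter_append, List.map_append, pvFilterSingle]
  exact pvRedMin_append _ _ (pvVal_mem_ne_nil ext P p.1 h)

lemma pvVal_append_self_max (P : List (Int × Int × Int)) (p : Int × Int × Int)
    (ext : Int × Int × Int → Int) (h : p.1 ∈ P.map (·.1)) :
    pvVal pvRedMax ext (P ++ [p]) p.1 = max (pvVal pvRedMax ext P p.1) (ext p) := by
  unfold pvVal
  rw [List.filter_append, List.map_append, pvFilterSingle]
  exact pvRedMax_append _ _ (pvVal_mem_ne_nil ext P p.1 h)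

lemma pvVal_append_new (red : List Int → Option Int) (ext : Int × Int × Int → Int)
    (P : List (Int × Int × Int)) (p : Int × Int × Int)
    (h1 : ∀ x, red [x] = some x) (h : p.1 ∉ P.map (·.1)) :
    pvVal red ext (P ++ [p]) p.1 = ext p := by
  have hnil : P.filter (fun q => q.1 == p.1) = [] := by
    apply List.filter_eq_nil_iff.mpr
    intro q hq
    simp only [beq_iff_eq]
    intro hq1
    exact h (List.mem_map.mpr ⟨q, hq, hq1⟩)
  unfold pvVal
  rw [List.filter_append, hnil, List.nil_append, pvFilterSingle, h1]
  rfl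

lemma pvDict_keys (red : List Int → Option Int) (ext : Int × Int × Int → Int)
    (P : List (Int × Int × Int)) : (pvDict red ext P).keys = pvK P := by
  simp only [pvDict, PySem.Dict.keys_mk, List.map_map]
  exact List.map_congr_left (fun k _ => rfl) |>.trans (List.map_id _)

lemma pvDict_contains (red : List Int → Option Int) (ext : Int × Int × Int → Int)
    (P : List (Int × Int × Int)) (k : Int) :
    (pvDict red ext P).contains k = decide (k ∈ pvK P) := by
  rw [PySem.Dict.contains_eq_decide_mem_keys, pvDict_keys]

lemma pvDict_getD (red : List Int → Option Int) (ext : Int × Int × Int → Int)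
    (P : List (Int × Int × Int)) (k : Int) (h : k ∈ pvK P) :
    (pvDict red ext P).getD k 0 = pvVal red ext P k := by
  apply PySem.Dict.getD_of_mem_items
  · show (k, pvVal red ext P k) ∈ (pvDict red ext P).items
    simp only [pvDict]
    exact List.mem_map.mpr ⟨k, h, rfl⟩
  · rw [pvDict_keys]; exact pvK_nodup P

-- One step of B on one dict: insert/update the extremum for pixel p.
lemma pvDictStep_mem (red : List Int → Option Int) (comb : Int → Int → Int)
    (ext : Int × Int × Int → Int) (P : List (Int × Int × Int)) (p : Int × Int × Int)
    (hself : pvVal red ext (P ++ [p]) p.1 = comb (pvVal red ext P p.1) (ext p))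
    (h : p.1 ∈ pvK P) :
    (pvDict red ext P).insert p.1 (comb ((pvDict red ext P).getD p.1 0) (ext p))
      = pvDict red ext (P ++ [p]) := by
  apply PySem.Dict.ext
  have hc : (pvDict red ext P).contains p.1 = true := by
    rw [pvDict_contains]; simpa using h
  rw [PySem.Dict.items_insert_of_contains _ _ hc, pvDict_getD red ext P p.1 h]
  have hK : pvK (P ++ [p]) = pvK P := by
    rw [pvK_append]
    simp only [PySem.Set.add]
    rw [if_pos]
    simpa [PySem.Set.contains] using h
  show ((pvK P).map _).map _ = (pvDict red ext (P ++ [p])).items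
  simp only [pvDict, hK, List.map_map]
  apply List.map_congr_left
  intro k hkmem
  by_cases hk : k = p.1
  · subst hk
    simp [Function.comp, hself]
  · simp [Function.comp, hk, pvVal_append_ne red ext P p k hk]

lemma pvDictStep_new (red : List Int → Option Int)
    (ext : Int × Int × Int → Int) (P : List (Int × Int × Int)) (p : Int × Int × Int)
    (h1 : ∀ x, red [x] = some x) (h : p.1 ∉ pvK P) :
    (pvDict red ext P).insert p.1 (ext p) = pvDict red ext (P ++ [p]) := by
  apply PySem.Dict.ext
  have hc : (pvDict red ext P).contains p.1 = false := by
    rw [pvDict_contains]; simpa using h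
  rw [PySem.Dict.items_insert_of_not_contains _ _ hc]
  have hmapmem : p.1 ∉ P.map (·.1) := fun hm => h ((PySem.Set.mem_ofList _ _).mpr hm)
  have hK : pvK (P ++ [p]) = pvK P ++ [p.1] := by
    rw [pvK_append]
    simp only [PySem.Set.add]
    rw [if_neg]
    simp only [PySem.Set.contains]
    simpa using h
  show (pvDict red ext P).items ++ [(p.1, ext p)] = (pvDict red ext (P ++ [p])).items
  simp only [pvDict, hK, List.map_append, List.map_cons, List.map_nil]
  congr 1
  · apply List.map_congr_left
    intro k hkmem
    have hk : k ≠ p.1 := fun hkp => h (hkp ▸ hkmem)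
    rw [pvVal_append_ne red ext P p k hk]
  · rw [pvVal_append_new red ext P p h1 hmapmem]

-- B's step function on the pixel stream.
def pvBstep (st : PySem.Dict Int Int × PySem.Dict Int Int × PySem.Dict Int Int × PySem.Dict Int Int)
    (p : Int × Int × Int) :
    PySem.Dict Int Int × PySem.Dict Int Int × PySem.Dict Int Int × PySem.Dict Int Int :=
  if st.1.contains p.1 then
    (st.1.insert p.1 (min (st.1.getD p.1 0) p.2.1),
     st.2.1.insert p.1 (max (st.2.1.getD p.1 0) p.2.1),
     st.2.2.1.insert p.1 (min (st.2.2.1.getD p.1 0) p.2.2),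
     st.2.2.2.insert p.1 (max (st.2.2.2.getD p.1 0) p.2.2))
  else
    (st.1.insert p.1 p.2.1, st.2.1.insert p.1 p.2.1,
     st.2.2.1.insert p.1 p.2.2, st.2.2.2.insert p.1 p.2.2)

lemma pvBfold (P : List (Int × Int × Int)) :
    P.foldl pvBstep (PySem.Dict.empty, PySem.Dict.empty, PySem.Dict.empty, PySem.Dict.empty)
      = (pvDict pvRedMin (·.2.1) P, pvDict pvRedMax (·.2.1) P,
         pvDict pvRedMin (·.2.2) P, pvDict pvRedMax (·.2.2) P) := by
  induction P using List.reverseRecOn with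
  | nil => rfl
  | append_singleton P p ih =>
    rw [List.foldl_append, List.foldl_cons, List.foldl_nil, ih]
    unfold pvBstep
    simp only [pvDict_contains]
    by_cases h : p.1 ∈ pvK P
    · rw [if_pos (by simpa using h)]
      have hm : p.1 ∈ P.map (·.1) := (PySem.Set.mem_ofList _ _).mp h
      rw [pvDictStep_mem pvRedMin min _ P p (pvVal_append_self_min P p _ hm) h,
          pvDictStep_mem pvRedMax max _ P p (pvVal_append_self_max P p _ hm) h,
          pvDictStep_mem pvRedMin min _ P p (pvVal_append_self_min P p _ hm) h,
          pvDictStep_mem pvRedMax max _ P p (pvVal_append_self_max P p _ hm) h]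
    · rw [if_neg (by simpa using h)]
      rw [pvDictStep_new pvRedMin _ P p pvRedMin_single h,
          pvDictStep_new pvRedMax _ P p pvRedMax_single h,
          pvDictStep_new pvRedMin _ P p pvRedMin_single h,
          pvDictStep_new pvRedMax _ P p pvRedMax_single h]

-- B's port computes the canonical tuple.
lemma pvB_char (components : List (List Int)) :
    CharacterExtraction_alt components
      = ((pvK (pvPixels components)).map (fun k => (k, pvVal pvRedMin (·.2.1) (pvPixels components) k)),
         (pvK (pvPixels components)).map (fun k => (k, pvVal pvRedMax (·.2.1) (pvPixels components) k)),
         (pvK (pvPixels components)).map (fun k => (k, pvVal pvRedMin (·.2.2) (pvPixels components) k)),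
         (pvK (pvPixels components)).map (fun k => (k, pvVal pvRedMax (·.2.2) (pvPixels components) k))) := by
  have hp : pvBPass components
      = (pvDict pvRedMin (·.2.1) (pvPixels components), pvDict pvRedMax (·.2.1) (pvPixels components),
         pvDict pvRedMin (·.2.2) (pvPixels components), pvDict pvRedMax (·.2.2) (pvPixels components)) := by
    show (PySem.List.enumerate components).foldl
        (fun st iv => (PySem.List.enumerate iv.2).foldl
          (fun st jv => if jv.2 == 0 then st else pvBstep st (jv.2, iv.1, jv.1)) st)
        (PySem.Dict.empty, PySem.Dict.empty, PySem.Dict.empty, PySem.Dict.empty) = _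
    rw [pvNested pvBstep components, pvBfold]
  unfold CharacterExtraction_alt
  rw [hp]
  rfl

-- A-side: pass 1 builds exactly the per-label coordinate lists.
def pvAstep (rc : PySem.Dict Int (List Int) × PySem.Dict Int (List Int)) (p : Int × Int × Int) :
    PySem.Dict Int (List Int) × PySem.Dict Int (List Int) :=
  (rc.1.modify p.1 [] (fun l => l ++ [p.2.1]), rc.2.modify p.1 [] (fun l => l ++ [p.2.2]))

lemma pvAPass1_eq (components : List (List Int)) :
    pvAPass1 components
      = ((pvPixels components).foldl (fun d p => d.modify p.1 [] (fun l => l ++ [p.2.1])) PySem.Dict.empty,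
         (pvPixels components).foldl (fun d p => d.modify p.1 [] (fun l => l ++ [p.2.2])) PySem.Dict.empty) := by
  have h1 : pvAPass1 components = (pvPixels components).foldl pvAstep (PySem.Dict.empty, PySem.Dict.empty) := by
    show (PySem.List.enumerate components).foldl
        (fun rc iv => (PySem.List.enumerate iv.2).foldl
          (fun rc jv => if jv.2 == 0 then rc else pvAstep rc (jv.2, iv.1, jv.1)) rc)
        (PySem.Dict.empty, PySem.Dict.empty) = _
    exact pvNested pvAstep components _
  rw [h1]
  exact pvFoldPair (fun (d : PySem.Dict Int (List Int)) (p : Int × Int × Int) => d.modify p.1 [] (fun l => l ++ [p.2.1]))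
    (fun (d : PySem.Dict Int (List Int)) (p : Int × Int × Int) => d.modify p.1 [] (fun l => l ++ [p.2.2]))
    (pvPixels components) PySem.Dict.empty PySem.Dict.empty

lemma pvAfold_fst_getD (P : List (Int × Int × Int)) (k : Int) :
    (P.foldl (fun (d : PySem.Dict Int (List Int)) p => d.modify p.1 [] (fun l => l ++ [p.2.1])) PySem.Dict.empty).getD k []
      = (P.filter (fun p => p.1 == k)).map (·.2.1) := by
  have h : P.foldl (fun (d : PySem.Dict Int (List Int)) p => d.modify p.1 [] (fun l => l ++ [p.2.1])) PySem.Dict.empty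
      = (P.map (fun p => (p.1, p.2.1))).foldl (fun d q => d.modify q.1 [] (fun l => l ++ [q.2])) PySem.Dict.empty := by
    rw [List.foldl_map]
  rw [h, PySem.Dict.getD_foldl_modify_append, List.filter_map, List.map_map]
  rw [show ((fun (q : Int × Int) => q.1 == k) ∘ fun (p : Int × Int × Int) => (p.1, p.2.1))
        = (fun (p : Int × Int × Int) => p.1 == k) from rfl]
  simp

lemma pvAfold_snd_getD (P : List (Int × Int × Int)) (k : Int) :
    (P.foldl (fun (d : PySem.Dict Int (List Int)) p => d.modify p.1 [] (fun l => l ++ [p.2.2])) PySem.Dict.empty).getD k []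
      = (P.filter (fun p => p.1 == k)).map (·.2.2) := by
  have h : P.foldl (fun (d : PySem.Dict Int (List Int)) p => d.modify p.1 [] (fun l => l ++ [p.2.2])) PySem.Dict.empty
      = (P.map (fun p => (p.1, p.2.2))).foldl (fun d q => d.modify q.1 [] (fun l => l ++ [q.2])) PySem.Dict.empty := by
    rw [List.foldl_map]
  rw [h, PySem.Dict.getD_foldl_modify_append, List.filter_map, List.map_map]
  rw [show ((fun (q : Int × Int) => q.1 == k) ∘ fun (p : Int × Int × Int) => (p.1, p.2.2))
        = (fun (p : Int × Int × Int) => p.1 == k) from rfl]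
  simp

lemma pvAfold_fst_keys (P : List (Int × Int × Int)) :
    (P.foldl (fun (d : PySem.Dict Int (List Int)) p => d.modify p.1 [] (fun l => l ++ [p.2.1])) PySem.Dict.empty).keys
      = pvK P := by
  have := PySem.Dict.keys_foldl_modify_key P (fun p => p.1) ([] : List Int)
    (fun _ p => fun l => l ++ [p.2.1]) PySem.Dict.empty
  exact this.trans rfl

lemma pvAfold_snd_keys (P : List (Int × Int × Int)) :
    (P.foldl (fun (d : PySem.Dict Int (List Int)) p => d.modify p.1 [] (fun l => l ++ [p.2.2])) PySem.Dict.empty).keys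
      = pvK P := by
  have := PySem.Dict.keys_foldl_modify_key P (fun p => p.1) ([] : List Int)
    (fun _ p => fun l => l ++ [p.2.2]) PySem.Dict.empty
  exact this.trans rfl

-- The reduction pass over a dict with Nodup keys just maps min/max over the key list.
lemma pvAReduce_items (d : PySem.Dict Int (List Int)) (hnd : d.keys.Nodup) :
    (pvAReduce d).1.items = d.keys.map (fun k => (k, (PySem.List.min? (d.getD k []) (fun x => x)).getD 0))
    ∧ (pvAReduce d).2.items = d.keys.map (fun k => (k, (PySem.List.max? (d.getD k []) (fun x => x)).getD 0)) := by
  have h1 : pvAReduce d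
      = (d.keys.foldl (fun dd k => dd.insert k ((PySem.List.min? (d.getD k []) (fun x => x)).getD 0)) PySem.Dict.empty,
         d.keys.foldl (fun dd k => dd.insert k ((PySem.List.max? (d.getD k []) (fun x => x)).getD 0)) PySem.Dict.empty) := by
    unfold pvAReduce
    exact pvFoldPair (fun (dd : PySem.Dict Int Int) k => dd.insert k ((PySem.List.min? (d.getD k []) (fun x => x)).getD 0))
      (fun (dd : PySem.Dict Int Int) k => dd.insert k ((PySem.List.max? (d.getD k []) (fun x => x)).getD 0))
      d.keys PySem.Dict.empty PySem.Dict.empty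
  rw [h1]
  constructor
  · rw [show (d.keys.foldl (fun dd k => dd.insert k ((PySem.List.min? (d.getD k []) (fun x => x)).getD 0)) PySem.Dict.empty)
        = (d.keys.foldl (fun dd a => dd.insert ((fun k => k) a) ((fun k => (PySem.List.min? (d.getD k []) (fun x => x)).getD 0) a)) PySem.Dict.empty) from rfl]
    rw [PySem.Dict.items_foldl_insert_fresh d.keys (fun k => k) _ PySem.Dict.empty
        (fun a _ => PySem.Dict.contains_empty a) (by simpa using hnd)]
    rw [show (PySem.Dict.empty : PySem.Dict Int Int).items = [] from rfl, List.nil_append]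
  · rw [show (d.keys.foldl (fun dd k => dd.insert k ((PySem.List.max? (d.getD k []) (fun x => x)).getD 0)) PySem.Dict.empty)
        = (d.keys.foldl (fun dd a => dd.insert ((fun k => k) a) ((fun k => (PySem.List.max? (d.getD k []) (fun x => x)).getD 0) a)) PySem.Dict.empty) from rfl]
    rw [PySem.Dict.items_foldl_insert_fresh d.keys (fun k => k) _ PySem.Dict.empty
        (fun a _ => PySem.Dict.contains_empty a) (by simpa using hnd)]
    rw [show (PySem.Dict.empty : PySem.Dict Int Int).items = [] from rfl, List.nil_append]

lemma pvA_char (components : List (List Int)) :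
    CharacterExtraction components
      = ((pvK (pvPixels components)).map (fun k => (k, pvVal pvRedMin (·.2.1) (pvPixels components) k)),
         (pvK (pvPixels components)).map (fun k => (k, pvVal pvRedMax (·.2.1) (pvPixels components) k)),
         (pvK (pvPixels components)).map (fun k => (k, pvVal pvRedMin (·.2.2) (pvPixels components) k)),
         (pvK (pvPixels components)).map (fun k => (k, pvVal pvRedMax (·.2.2) (pvPixels components) k))) := by
  unfold CharacterExtraction
  rw [pvAPass1_eq]
  have hk1 := pvAfold_fst_keys (pvPixels components)
  have hk2 := pvAfold_snd_keys (pvPixels components)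
  have hnd1 : (((pvPixels components).foldl (fun (d : PySem.Dict Int (List Int)) p => d.modify p.1 [] (fun l => l ++ [p.2.1])) PySem.Dict.empty)).keys.Nodup := by
    rw [hk1]; exact pvK_nodup _
  have hnd2 : (((pvPixels components).foldl (fun (d : PySem.Dict Int (List Int)) p => d.modify p.1 [] (fun l => l ++ [p.2.2])) PySem.Dict.empty)).keys.Nodup := by
    rw [hk2]; exact pvK_nodup _
  obtain ⟨e1, e2⟩ := pvAReduce_items _ hnd1
  obtain ⟨e3, e4⟩ := pvAReduce_items _ hnd2
  rw [e1, e2, e3, e4, hk1, hk2]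
  refine Prod.ext ?_ (Prod.ext ?_ (Prod.ext ?_ ?_)) <;>
    · apply List.map_congr_left
      intro k hkmem
      first
        | rw [pvAfold_fst_getD]; rfl
        | rw [pvAfold_snd_getD]; rfl

-- ===== VERDICT (by name: the statement is the Claim_ definition above) =====
theorem CharacterExtraction_spec : Claim_equal_CharacterExtraction := by
  intro components _
  unfold Spec_CharacterExtraction
  rw [pvA_char, pvB_char]
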